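-- pv_equiv track=rewrite | github.com/tkaminsky/OAT_Trust | samplers.py | get_all_k_blocks
-- ===== SOURCE A (Python) =====
-- def get_all_k_blocks(N, k):
--     """
--     Get all possible ways to split a list of size N k times
--     """
--     result = []
--
--     # Base case
--     if k == 1:
--         return [[i] for i in range(1, N)]
--
--     # Recursive case
--     first_split = [[i] for i in range(1, N - k + 1)]
--     for split in first_split:
--         for block in get_all_k_blocks(N - split[0], k - 1):
--             block_local = [i + split[0] for i in block]
--             result.append(split + block_local)
--
--     return result
-- ===== SOURCE B (Python) =====
-- def get_all_k_blocks(N, k):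
--     # Level-wise construction: grow all increasing prefixes one element per round.
--     if k < 1 or k > N - 1:
--         return []
--     partial = [[]]
--     for _ in range(k):
--         partial = [p + [x]
--                    for p in partial
--                    for x in range(p[-1] + 1 if p else 1, N)]
--     return partial
-- ===== Notes on version B (the rewrite author's own statement) =====
-- stated objective: simpler
-- what changed: Replaces A's arithmetic recursion (recurse on k with N shrunk and every sub-block shifted by the chosen split) by a single level-wise loop that runs k rounds, each round extending every increasing prefix by all possible next split points below N; no recursion, no shifting, no post-hoc list additions.
import Mathlib
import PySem

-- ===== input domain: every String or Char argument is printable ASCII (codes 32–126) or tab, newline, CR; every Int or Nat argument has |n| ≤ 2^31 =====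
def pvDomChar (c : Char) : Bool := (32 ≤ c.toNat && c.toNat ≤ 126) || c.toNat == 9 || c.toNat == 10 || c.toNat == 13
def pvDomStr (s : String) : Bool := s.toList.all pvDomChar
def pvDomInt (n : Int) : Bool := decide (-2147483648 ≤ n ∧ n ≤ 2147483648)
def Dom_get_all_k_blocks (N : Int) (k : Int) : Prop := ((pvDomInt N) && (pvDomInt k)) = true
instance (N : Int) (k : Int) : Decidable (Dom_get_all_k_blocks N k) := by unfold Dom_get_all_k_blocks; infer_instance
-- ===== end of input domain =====

-- B replaces A's recursion on k (with shifted sub-blocks) by one level-wise loop that extends all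
-- increasing prefixes; objective: simpler.

-- ===== PORT A =====
-- Literal transliteration of A, made total with a fuel parameter (the recursion decrements k, so
-- fuel k.toNat + 1 is ample on every input where the Python terminates; the fuel is only a totality guard).
def goA : Nat → Int → Int → List (List Int)
  | 0, _, _ => []
  | f + 1, N, k =>
    if k = 1 then (PySem.List.pyRange 1 N 1).map (fun i => [i])
    else
      (PySem.List.pyRange 1 (N - k + 1) 1).foldl (fun result i =>
        (goA f (N - i) (k - 1)).foldl (fun result block =>
          result ++ [[i] ++ block.map (fun x => x + i)]) result) []

def get_all_k_blocks (N : Int) (k : Int) : List (List Int) := goA (k.toNat + 1) N k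

-- ===== PORT B =====
-- start of the range a prefix p may be extended with: p[-1] + 1 if p else 1
def startB (p : List Int) : Int :=
  if p.isEmpty then 1 else ((PySem.List.pyGet? p (-1)).getD 0) + 1

-- one round of B's loop: extend every prefix by every admissible next element
def stepB (N : Int) (P : List (List Int)) : List (List Int) :=
  P.flatMap (fun p => (PySem.List.pyRange (startB p) N 1).map (fun x => p ++ [x]))

def get_all_k_blocks_alt (N : Int) (k : Int) : List (List Int) :=
  if k < 1 ∨ N - 1 < k then []
  else (List.range k.toNat).foldl (fun P _ => stepB N P) [[]]

-- ===== PRECONDITION & SPEC =====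
-- Pre_ is exactly the set of inputs on which Python A returns: for k ≤ 0 with k < N the recursion
-- never reaches the base case k == 1 and A raises RecursionError.
def Pre_get_all_k_blocks (N : Int) (k : Int) : Prop := 1 ≤ k ∨ N ≤ k
instance (N : Int) (k : Int) : Decidable (Pre_get_all_k_blocks N k) := by
  unfold Pre_get_all_k_blocks; infer_instance

def pvWitness_get_all_k_blocks : Int × Int := (5, 2)

def Spec_get_all_k_blocks (N : Int) (k : Int) (out : List (List Int)) : Prop :=
  out = get_all_k_blocks_alt N k
instance (N : Int) (k : Int) (out : List (List Int)) : Decidable (Spec_get_all_k_blocks N k out) := by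
  unfold Spec_get_all_k_blocks; infer_instance

-- ===== CLAIM (what is proved, stated in full; the proofs are below) =====
def Claim_equal_get_all_k_blocks : Prop := ∀ (N : Int) (k : Int), Dom_get_all_k_blocks N k →
  Pre_get_all_k_blocks N k → Spec_get_all_k_blocks N k (get_all_k_blocks N k)

-- ===== LEMMAS AND PROOFS =====

-- the common characterisation: all strictly increasing n-tuples over [a..b], in lexicographic order
def combos : Int → Int → Nat → List (List Int)
  | _, _, 0 => [[]]
  | a, b, n + 1 =>
    (PySem.List.pyRange a (b + 1) 1).flatMap (fun i => (combos (i + 1) b n).map (fun t => i :: t))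

lemma pv_flatMap_map_sing {α β : Type} (l : List α) (f : α → β) :
    l.flatMap (fun x => [f x]) = l.map f := by
  induction l with
  | nil => rfl
  | cons x xs ih => simp [ih]

lemma combos_succ (a b : Int) (n : Nat) : combos a b (n + 1)
    = (PySem.List.pyRange a (b + 1) 1).flatMap
        (fun i => (combos (i + 1) b n).map (fun t => i :: t)) := rfl

lemma combos_nil : ∀ (n : Nat) (a b : Int), b - a < (n : Int) → combos a b (n + 1) = [] := by
  intro n
  induction n with
  | zero =>
    intro a b h
    rw [combos_succ, PySem.List.pyRange_one_eq_nil (by omega)]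
    simp
  | succ m ih =>
    intro a b h
    rw [combos_succ, List.flatMap_eq_nil_iff]
    intro i hi
    rw [PySem.List.mem_pyRange_one] at hi
    rw [ih (i + 1) b (by omega)]
    simp

lemma combos_shift : ∀ (n : Nat) (a b c : Int),
    (combos a b n).map (List.map (· + c)) = combos (a + c) (b + c) n := by
  intro n
  induction n with
  | zero => intro a b c; simp [combos]
  | succ m ih =>
    intro a b c
    rw [combos_succ, combos_succ]
    have hr : PySem.List.pyRange (a + c) (b + c + 1) 1
        = (PySem.List.pyRange a (b + 1) 1).map (· + c) := by
      rw [PySem.List.pyRange_one, PySem.List.pyRange_one, List.map_map]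
      rw [show b + c + 1 - (a + c) = b + 1 - a from by ring]
      apply List.map_congr_left
      intro x _
      simp only [Function.comp_apply]
      ring
    rw [hr, List.map_flatMap, List.flatMap_map]
    apply List.flatMap_congr
    intro i _
    rw [List.map_map, show i + c + 1 = i + 1 + c from by ring, ← ih (i + 1) b c,
        List.map_map]
    apply List.map_congr_left
    intro t _
    simp

lemma goA_eq : ∀ (n f : Nat) (N k : Int), k = (n : Int) + 1 → n + 1 ≤ f →
    goA f N k = combos 1 (N - 1) (n + 1) := by
  intro n
  induction n with
  | zero =>
    intro f N k hk hf
    obtain ⟨f', rfl⟩ : ∃ f', f = f' + 1 := ⟨f - 1, by omega⟩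
    simp only [goA]
    rw [if_pos (show k = 1 by omega)]
    simp only [combos, List.map_cons, List.map_nil]
    rw [show N - 1 + 1 = N from by ring]
    exact (pv_flatMap_map_sing _ _).symm
  | succ m ih =>
    intro f N k hk hf
    obtain ⟨f', rfl⟩ : ∃ f', f = f' + 1 := ⟨f - 1, by omega⟩
    simp only [goA]
    rw [if_neg (show ¬ k = 1 by omega)]
    have houter : (PySem.List.pyRange 1 (N - k + 1) 1).foldl (fun result i =>
        (goA f' (N - i) (k - 1)).foldl (fun result block =>
          result ++ [[i] ++ block.map (fun x => x + i)]) result) []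
        = (PySem.List.pyRange 1 (N - k + 1) 1).flatMap
            (fun i => (goA f' (N - i) (k - 1)).map (fun block => [i] ++ block.map (fun x => x + i))) := by
      have hfn : (fun (result : List (List Int)) (i : Int) =>
          (goA f' (N - i) (k - 1)).foldl (fun result block =>
            result ++ [[i] ++ block.map (fun x => x + i)]) result)
          = fun result i => result ++ (goA f' (N - i) (k - 1)).map
              (fun block => [i] ++ block.map (fun x => x + i)) := by
        funext r i
        exact PySem.List.foldl_append_singleton_eq_map _ _ _
      rw [hfn, PySem.List.foldl_append_eq_flatMap, List.nil_append]
    rw [houter]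
    have hper : ∀ i : Int,
        (goA f' (N - i) (k - 1)).map (fun block => [i] ++ block.map (fun x => x + i))
        = (combos (i + 1) (N - 1) (m + 1)).map (fun t => i :: t) := by
      intro i
      rw [ih f' (N - i) (k - 1) (by omega) (by omega)]
      rw [show i + 1 = 1 + i from by ring, show N - 1 = N - i - 1 + i from by ring,
          ← combos_shift (m + 1) 1 (N - i - 1) i, List.map_map]
      apply List.map_congr_left
      intro b _
      simp only [Function.comp_apply, List.singleton_append]
    rw [List.flatMap_congr (fun i _ => hper i)]
    have hc : combos 1 (N - 1) (m + 1 + 1)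
        = (PySem.List.pyRange 1 (N - 1 + 1) 1).flatMap
            (fun i => (combos (i + 1) (N - 1) (m + 1)).map (fun t => i :: t)) := by
      simp only [combos]
    rw [hc, show N - 1 + 1 = N from by ring]
    by_cases hO : (1 : Int) ≤ N - k + 1
    · rw [PySem.List.pyRange_one_append 1 (N - k + 1) N hO (by omega), List.flatMap_append]
      have htail : (PySem.List.pyRange (N - k + 1) N 1).flatMap
          (fun i => (combos (i + 1) (N - 1) (m + 1)).map (fun t => i :: t)) = [] := by
        rw [List.flatMap_eq_nil_iff]
        intro i hi
        rw [PySem.List.mem_pyRange_one] at hi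
        rw [combos_nil m (i + 1) (N - 1) (by omega)]
        simp
      rw [htail, List.append_nil]
    · rw [PySem.List.pyRange_one_eq_nil (by omega)]
      simp only [List.flatMap_nil]
      symm
      rw [List.flatMap_eq_nil_iff]
      intro i hi
      rw [PySem.List.mem_pyRange_one] at hi
      rw [combos_nil m (i + 1) (N - 1) (by omega)]
      simp

def iterB (N : Int) : Nat → List (List Int) → List (List Int)
  | 0, P => P
  | n + 1, P => iterB N n (stepB N P)

lemma iterB_stepB_comm (N : Int) : ∀ (n : Nat) (P : List (List Int)),
    iterB N n (stepB N P) = stepB N (iterB N n P) := by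
  intro n
  induction n with
  | zero => intro P; rfl
  | succ m ih =>
    intro P
    simp only [iterB]
    exact ih (stepB N P)

lemma foldl_range_stepB (N : Int) : ∀ (n : Nat) (P : List (List Int)),
    (List.range n).foldl (fun P _ => stepB N P) P = iterB N n P := by
  intro n
  induction n with
  | zero => intro P; rfl
  | succ m ih =>
    intro P
    rw [List.range_succ, List.foldl_append]
    simp only [List.foldl_cons, List.foldl_nil]
    rw [ih P, ← iterB_stepB_comm]
    rfl

lemma startB_append (p : List Int) (x : Int) : startB (p ++ [x]) = x + 1 := by
  simp [startB, PySem.List.pyGet?_neg_one_append_singleton]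

lemma iterB_eq (N : Int) : ∀ (n : Nat) (P : List (List Int)),
    iterB N n P = P.flatMap (fun p => (combos (startB p) (N - 1) n).map (fun t => p ++ t)) := by
  intro n
  induction n with
  | zero =>
    intro P
    simp only [iterB, combos, List.map_cons, List.map_nil, List.append_nil]
    exact (List.flatMap_singleton' P).symm
  | succ m ih =>
    intro P
    simp only [iterB]
    rw [ih (stepB N P)]
    unfold stepB
    rw [List.flatMap_assoc]
    apply List.flatMap_congr
    intro p _
    rw [List.flatMap_map]
    have hc : combos (startB p) (N - 1) (m + 1)
        = (PySem.List.pyRange (startB p) (N - 1 + 1) 1).flatMap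
            (fun x => (combos (x + 1) (N - 1) m).map (fun t => x :: t)) := by
      simp only [combos]
    rw [hc, show N - 1 + 1 = N from by ring, List.map_flatMap]
    apply List.flatMap_congr
    intro x _
    rw [startB_append, List.map_map]
    apply List.map_congr_left
    intro t _
    simp only [Function.comp_apply, List.append_assoc, List.singleton_append]

-- ===== VERDICT (by name: the statement is the Claim_ definition above) =====
theorem get_all_k_blocks_spec : Claim_equal_get_all_k_blocks := by
  intro N k _ hPre
  unfold Spec_get_all_k_blocks get_all_k_blocks get_all_k_blocks_alt
  by_cases h1 : (1 : Int) ≤ k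
  · have hsz : (k.toNat - 1) + 1 = k.toNat := by omega
    have hA : goA (k.toNat + 1) N k = combos 1 (N - 1) ((k.toNat - 1) + 1) :=
      goA_eq (k.toNat - 1) (k.toNat + 1) N k (by omega) (by omega)
    by_cases h2 : N - 1 < k
    · rw [if_pos (Or.inr h2), hA]
      exact combos_nil (k.toNat - 1) 1 (N - 1) (by omega)
    · rw [if_neg (show ¬ (k < 1 ∨ N - 1 < k) by omega)]
      rw [foldl_range_stepB, iterB_eq, hA, hsz, List.flatMap_singleton]
      simp [startB]
  · have hNk : N ≤ k := by
      rcases hPre with h | h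
      · omega
      · exact h
    rw [if_pos (Or.inl (by omega))]
    rw [show k.toNat = 0 from by omega]
    simp only [goA]
    rw [if_neg (show ¬ k = 1 by omega), PySem.List.pyRange_one_eq_nil (by omega)]
    rfl
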